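-- pv_equiv track=rewrite | github.com/rdguerrerom/Fast_Chess_Agent | agent/agent.py | _compress_rank
-- ===== SOURCE A (Python) =====
-- from typing import Dict, List, Optional, Tuple
-- from typing import Dict, List, Tuple, Optional, Union
-- from typing import Dict, List, Tuple, Optional, Union
--
-- def _compress_rank(rank_squares: List[str]) -> str:
--     """Compress rank representation efficiently"""
--     compressed = []
--     empty_count = 0
--
--     for square in rank_squares:
--         if square == " ":
--             empty_count += 1
--         else:
--             if empty_count > 0:
--                 compressed.append(str(empty_count))
--                 empty_count = 0
--             compressed.append(square)
--
--     if empty_count > 0: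
--         compressed.append(str(empty_count))
--
--     return "".join(compressed)
-- ===== SOURCE B (Python) =====
-- from typing import List
--
-- def _compress_rank(rank_squares: List[str]) -> str:
--     """Compress rank representation by scanning maximal runs of equal squares."""
--     out = []
--     i = 0
--     n = len(rank_squares)
--     while i < n:
--         s = rank_squares[i]
--         j = i
--         while j < n and rank_squares[j] == s:
--             j += 1
--         run = j - i
--         out.append(str(run) if s == " " else s * run)
--         i = j
--     return "".join(out)
-- ===== Notes on version B (the rewrite author's own statement) =====
-- stated objective: alternative
-- what changed: B replaces A's per-element fold with a flush-at-end empty counter by a run-length scan: two-index while loops find each maximal run of equal squares and emit str(run) for spaces or the square repeated run times, with no trailing-flush logic.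
import Mathlib
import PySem

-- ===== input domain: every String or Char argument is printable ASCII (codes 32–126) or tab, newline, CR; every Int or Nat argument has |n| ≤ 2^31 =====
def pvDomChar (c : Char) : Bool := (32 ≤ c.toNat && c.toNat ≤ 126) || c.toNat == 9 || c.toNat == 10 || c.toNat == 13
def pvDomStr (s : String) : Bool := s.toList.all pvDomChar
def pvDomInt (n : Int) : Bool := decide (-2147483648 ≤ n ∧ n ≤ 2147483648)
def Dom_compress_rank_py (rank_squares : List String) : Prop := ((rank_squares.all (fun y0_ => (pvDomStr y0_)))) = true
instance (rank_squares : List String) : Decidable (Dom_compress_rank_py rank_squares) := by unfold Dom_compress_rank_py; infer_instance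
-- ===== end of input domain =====

-- B compresses by scanning maximal runs of equal squares instead of A's per-element
-- fold with an empty-square counter and end-of-loop flush (objective: alternative).

-- ===== PORT A =====
-- the flushed counter, as the (possibly empty) list A appends: [str(empty_count)] if > 0
def pvFlushS (e : Nat) : List String := if e > 0 then [PySem.Int.toStr (e : Int)] else []

-- A's loop body: state = (compressed, empty_count)
def pvStepA (st : List String × Nat) (square : String) : List String × Nat :=
  if square = " " then (st.1, st.2 + 1)
  else ((st.1 ++ pvFlushS st.2) ++ [square], 0)

-- A: fold over the squares keeping (compressed, empty_count); flush the counter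
-- before each non-space square and once more after the loop.
def compress_rank_py (rank_squares : List String) : String :=
  let st := rank_squares.foldl pvStepA ([], 0)
  String.join (st.1 ++ pvFlushS st.2)

-- ===== PORT B =====
-- B: take each maximal run of equal squares (inner scan = takeWhile/dropWhile),
-- emit str(run) for spaces, the square repeated run times otherwise.
def compress_rank_py_alt : List String → String
  | [] => ""
  | x :: xs =>
    let run := (xs.takeWhile (fun y => y = x)).length + 1
    (if x = " " then PySem.Int.toStr (run : Int) else String.join (List.replicate run x)) ++
      compress_rank_py_alt (xs.dropWhile (fun y => y = x))
termination_by l => l.length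
decreasing_by simpa using Nat.lt_succ_of_le (xs.length_dropWhile_le _)

-- ===== PRECONDITION & SPEC =====
def Spec_compress_rank_py (rank_squares : List String) (out : String) : Prop := out = compress_rank_py_alt rank_squares
instance (rank_squares : List String) (out : String) : Decidable (Spec_compress_rank_py rank_squares out) := by unfold Spec_compress_rank_py; infer_instance

-- ===== CLAIM (what is proved, stated in full; the proofs are below) =====
def Claim_equal_compress_rank_py : Prop := ∀ (rank_squares : List String), Dom_compress_rank_py rank_squares → Spec_compress_rank_py rank_squares (compress_rank_py rank_squares)

-- ===== LEMMAS AND PROOFS =====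

/-- the string A appends when flushing a counter value `e` (empty when `e = 0`) -/
def pvFlush (e : Nat) : String := if e > 0 then PySem.Int.toStr (e : Int) else ""

/-- left-to-right recursive characterisation of A's loop from state `e` -/
def pvF : List String → Nat → String
  | [], e => pvFlush e
  | x :: xs, e => if x = " " then pvF xs (e + 1) else pvFlush e ++ x ++ pvF xs 0

theorem pv_join_acc (l : List String) (a : String) :
    l.foldl (· ++ ·) a = a ++ String.join l := by
  induction l generalizing a with
  | nil => simp [String.join]
  | cons s t ih =>
    show List.foldl _ (a ++ s) t = a ++ String.join (s :: t)
    rw [ih (a ++ s)]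
    conv_rhs => rw [String.join, List.foldl, ih ("" ++ s)]
    simp [String.append_assoc, String.join]

theorem pv_join_cons (s : String) (l : List String) :
    String.join (s :: l) = s ++ String.join l := by
  rw [String.join, List.foldl, pv_join_acc]
  simp [String.join]

theorem pv_join_append (a b : List String) :
    String.join (a ++ b) = String.join a ++ String.join b := by
  induction a with
  | nil => simp [String.join]
  | cons s t ih => simp [pv_join_cons, ih, String.append_assoc]

theorem pv_join_flushS (e : Nat) : String.join (pvFlushS e) = pvFlush e := by
  unfold pvFlushS pvFlush
  split <;> simp [String.join]

/-- A's fold from any state equals the already-joined prefix plus `pvF`. -/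
theorem pv_foldA (l : List String) (acc : List String) (e : Nat) :
    String.join ((l.foldl pvStepA (acc, e)).1 ++ pvFlushS (l.foldl pvStepA (acc, e)).2)
    = String.join acc ++ pvF l e := by
  induction l generalizing acc e with
  | nil => simp [pvF, pv_join_append, pv_join_flushS]
  | cons x xs ih =>
    rw [List.foldl_cons]
    by_cases hx : x = " "
    · rw [show pvStepA (acc, e) x = (acc, e + 1) from by simp [pvStepA, hx]]
      rw [ih, pvF, if_pos hx]
    · rw [show pvStepA (acc, e) x = ((acc ++ pvFlushS e) ++ [x], 0) from by simp [pvStepA, hx]]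
      rw [ih, pvF, if_neg hx, pv_join_append, pv_join_append, pv_join_cons, pv_join_flushS]
      simp [String.join, String.append_assoc]

/-- for a non-space head, B emits it and continues: runs of it merge. -/
theorem pv_alt_run (x : String) (xs : List String) (hx : ¬ x = " ") :
    compress_rank_py_alt (x :: xs) = x ++ compress_rank_py_alt xs := by
  cases xs with
  | nil => simp [compress_rank_py_alt, hx, String.join]
  | cons y ys =>
    by_cases hy : y = x
    · subst hy
      rw [compress_rank_py_alt, compress_rank_py_alt]
      simp only [hx, if_false, List.takeWhile, List.dropWhile, decide_true]
      simp only [List.length_cons]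
      rw [List.replicate_succ, pv_join_cons, String.append_assoc]
    · rw [compress_rank_py_alt]
      simp [hx, List.takeWhile, List.dropWhile, hy, String.join]

/-- B's output = flush of the leading run of spaces, then B on the rest. -/
theorem pv_alt_space (l : List String) :
    compress_rank_py_alt l
      = pvFlush (l.takeWhile (fun y => y = " ")).length
        ++ compress_rank_py_alt (l.dropWhile (fun y => y = " ")) := by
  cases l with
  | nil => simp [compress_rank_py_alt, pvFlush]
  | cons x xs =>
    by_cases hx : x = " "
    · subst hx
      rw [compress_rank_py_alt]
      simp [List.takeWhile, List.dropWhile, pvFlush]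
    · simp [List.takeWhile, List.dropWhile, hx, pvFlush]

/-- `pvF` from state `e` = flush of `e` plus the leading spaces, then B on the rest. -/
theorem pv_F_alt (l : List String) (e : Nat) :
    pvF l e
      = pvFlush (e + (l.takeWhile (fun y => y = " ")).length)
        ++ compress_rank_py_alt (l.dropWhile (fun y => y = " ")) := by
  induction l generalizing e with
  | nil => simp [pvF, compress_rank_py_alt]
  | cons x xs ih =>
    by_cases hx : x = " "
    · subst hx
      rw [pvF, if_pos rfl, ih]
      simp only [List.takeWhile, List.dropWhile, decide_true, List.length_cons]
      have h : e + 1 + (xs.takeWhile (fun y => y = " ")).length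
             = e + ((xs.takeWhile (fun y => y = " ")).length + 1) := by omega
      rw [h]
    · rw [pvF, if_neg hx, ih, Nat.zero_add, ← pv_alt_space]
      simp [List.takeWhile, List.dropWhile, hx, pv_alt_run x xs hx, String.append_assoc]

-- ===== VERDICT (by name: the statement is the Claim_ definition above) =====
theorem compress_rank_py_spec : Claim_equal_compress_rank_py := by
  intro l _
  unfold Spec_compress_rank_py
  show String.join ((l.foldl pvStepA ([], 0)).1 ++ pvFlushS (l.foldl pvStepA ([], 0)).2)
      = compress_rank_py_alt l
  rw [pv_foldA, pv_F_alt, Nat.zero_add, ← pv_alt_space]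
  simp [String.join]
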